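-- pv_equiv track=rewrite | github.com/sp92231/cap4601 | Informed Search/Portal_ComputerPlayVersionGreedy.py | CheckThreeInRow
-- ===== SOURCE A (Python) =====
-- def CheckThreeInRow(board, val):
--     # check horizontal
--     for i in range(0, 3):
--         if ((board[i][0] == val) and (board[i][1] == val) and (board[i][2] == val)):
--             return True
--
--     # check vertical
--     for i in range(0, 3):
--         if ((board[0][i] == val) and (board[1][i] == val) and (board[2][i] == val)):
--             return True
--
--     # check diagonals
--     if ((board[0][0] == val) and (board[1][1] == val) and (board[2][2] == val)):
--         return True
--     if ((board[0][2] == val) and (board[1][1] == val) and (board[2][0] == val)):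
--         return True
--
--     return False
-- ===== SOURCE B (Python) =====
-- def CheckThreeInRow(board, val):
--     # Lo Shu magic square: three distinct cells form a winning line
--     # if and only if their magic numbers sum to 15.
--     magic = (2, 7, 6, 9, 5, 1, 4, 3, 8)
--     cells = [magic[3 * r + c] for r in range(3) for c in range(3) if board[r][c] == val]
--     n = len(cells)
--     for i in range(n):
--         for j in range(i + 1, n):
--             for k in range(j + 1, n):
--                 if cells[i] + cells[j] + cells[k] == 15:
--                     return True
--     return False
-- ===== Notes on version B (the rewrite author's own statement) =====
-- stated objective: alternative
-- what changed: Replaces A's hard-coded checks of the 8 lines with the Lo Shu magic-square criterion: collect the magic numbers of cells equal to val and report whether any three of them sum to 15.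
-- outside the precondition, e.g. on CheckThreeInRow([[1, 1, 1]], 1): A returns True, B raises IndexError
import Mathlib
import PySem

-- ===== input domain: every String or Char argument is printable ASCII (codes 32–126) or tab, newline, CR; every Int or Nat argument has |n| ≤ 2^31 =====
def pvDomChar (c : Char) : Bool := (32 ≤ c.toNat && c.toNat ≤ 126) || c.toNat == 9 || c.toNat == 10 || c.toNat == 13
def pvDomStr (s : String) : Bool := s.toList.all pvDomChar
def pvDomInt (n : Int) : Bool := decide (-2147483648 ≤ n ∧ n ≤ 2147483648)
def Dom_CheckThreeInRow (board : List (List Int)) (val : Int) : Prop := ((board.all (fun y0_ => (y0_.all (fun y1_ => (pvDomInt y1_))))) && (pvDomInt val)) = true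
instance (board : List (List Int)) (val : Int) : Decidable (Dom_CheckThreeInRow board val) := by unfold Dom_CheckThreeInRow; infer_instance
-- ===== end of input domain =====

-- B replaces A's hard-coded line checks with the Lo Shu magic-square criterion:
-- collect magic numbers of cells equal to val and test whether any three sum to 15;
-- objective: alternative algorithm.


-- cell access board[i][j]; exact for in-range nonnegative indices (guaranteed by Pre_)
def pvCell (board : List (List Int)) (i j : Nat) : Int :=
  (board.getD i []).getD j 0

-- ===== PORT A =====
-- literal transliteration: two range(0,3) loops with early return, then two diagonal ifs
def CheckThreeInRow (board : List (List Int)) (val : Int) : Bool :=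
  -- horizontal loop (early return = short-circuit or)
  (PySem.List.pyRange 0 3 1).any (fun i =>
      pvCell board i.toNat 0 == val && pvCell board i.toNat 1 == val && pvCell board i.toNat 2 == val) ||
  -- vertical loop
  (PySem.List.pyRange 0 3 1).any (fun i =>
      pvCell board 0 i.toNat == val && pvCell board 1 i.toNat == val && pvCell board 2 i.toNat == val) ||
  -- diagonals
  (pvCell board 0 0 == val && pvCell board 1 1 == val && pvCell board 2 2 == val) ||
  (pvCell board 0 2 == val && pvCell board 1 1 == val && pvCell board 2 0 == val)

-- ===== PORT B =====
-- the Lo Shu magic square, row-major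
def pvMagic : List Int := [2, 7, 6, 9, 5, 1, 4, 3, 8]

def CheckThreeInRow_alt (board : List (List Int)) (val : Int) : Bool :=
  -- cells = [magic[3*r+c] for r in range(3) for c in range(3) if board[r][c] == val]
  let cells : List Int :=
    (PySem.List.pyRange 0 3 1).flatMap (fun r =>
      (PySem.List.pyRange 0 3 1).flatMap (fun c =>
        if pvCell board r.toNat c.toNat == val then
          [pvMagic.getD (3 * r.toNat + c.toNat) 0] else []))
  let n : Int := cells.length
  -- triple nested loop over index triples i < j < k with early return
  (PySem.List.pyRange 0 n 1).any (fun i =>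
    (PySem.List.pyRange (i + 1) n 1).any (fun j =>
      (PySem.List.pyRange (j + 1) n 1).any (fun k =>
        cells.getD i.toNat 0 + cells.getD j.toNat 0 + cells.getD k.toNat 0 == 15)))

-- ===== PRECONDITION & SPEC =====
-- Pre_ excludes boards that are not at least 3×3, on which Python A in general
-- raises IndexError (on some such boards A's early winning line still returns True
-- before the bad access, while B, which always reads all 9 cells, raises — see cite).
def Pre_CheckThreeInRow (board : List (List Int)) (val : Int) : Prop :=
  3 ≤ board.length ∧ ∀ r ∈ board.take 3, 3 ≤ r.length
instance (board : List (List Int)) (val : Int) : Decidable (Pre_CheckThreeInRow board val) := by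
  unfold Pre_CheckThreeInRow; infer_instance

def pvWitness_CheckThreeInRow : List (List Int) × Int :=
  ([[1, 0, 2], [0, 1, 0], [2, 0, 1]], 1)

def Spec_CheckThreeInRow (board : List (List Int)) (val : Int) (out : Bool) : Prop := out = CheckThreeInRow_alt board val
instance (board : List (List Int)) (val : Int) (out : Bool) : Decidable (Spec_CheckThreeInRow board val out) := by unfold Spec_CheckThreeInRow; infer_instance

-- ===== CLAIM (what is proved, stated in full; the proofs are below) =====
def Claim_equal_CheckThreeInRow : Prop := ∀ (board : List (List Int)) (val : Int), Dom_CheckThreeInRow board val → Pre_CheckThreeInRow board val → Spec_CheckThreeInRow board val (CheckThreeInRow board val)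

-- ===== LEMMAS AND PROOFS =====

-- ===== VERDICT (by name: the statement is the Claim_ definition above) =====
theorem CheckThreeInRow_spec : Claim_equal_CheckThreeInRow := by
  intro board val _ hpre
  obtain ⟨hlen, hrows⟩ := hpre
  match board, hlen with
  | r0 :: r1 :: r2 :: rest, _ =>
    have h0 : 3 ≤ r0.length := hrows r0 (by simp)
    have h1 : 3 ≤ r1.length := hrows r1 (by simp)
    have h2 : 3 ≤ r2.length := hrows r2 (by simp)
    match r0, h0 with
    | a00 :: a01 :: a02 :: t0, _ =>
    match r1, h1 with
    | a10 :: a11 :: a12 :: t1, _ =>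
    match r2, h2 with
    | a20 :: a21 :: a22 :: t2, _ =>
      unfold Spec_CheckThreeInRow CheckThreeInRow CheckThreeInRow_alt
      rw [show PySem.List.pyRange 0 3 1 = [0, 1, 2] from by decide]
      simp only [List.flatMap_cons, List.flatMap_nil, List.any_cons, List.any_nil,
        List.append_nil, Bool.or_false, Int.toNat_zero, Int.toNat_one, show (2 : Int).toNat = 2 from rfl,
        show pvCell ((a00 :: a01 :: a02 :: t0) :: (a10 :: a11 :: a12 :: t1) :: (a20 :: a21 :: a22 :: t2) :: rest) 0 0 = a00 from rfl, show pvCell ((a00 :: a01 :: a02 :: t0) :: (a10 :: a11 :: a12 :: t1) :: (a20 :: a21 :: a22 :: t2) :: rest) 0 1 = a01 from rfl, show pvCell ((a00 :: a01 :: a02 :: t0) :: (a10 :: a11 :: a12 :: t1) :: (a20 :: a21 :: a22 :: t2) :: rest) 0 2 = a02 from rfl, show pvCell ((a00 :: a01 :: a02 :: t0) :: (a10 :: a11 :: a12 :: t1) :: (a20 :: a21 :: a22 :: t2) :: rest) 1 0 = a10 from rfl, show pvCell ((a00 :: a01 :: a02 :: t0) :: (a10 :: a11 :: a12 :: t1)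 :: (a20 :: a21 :: a22 :: t2) :: rest) 1 1 = a11 from rfl, show pvCell ((a00 :: a01 :: a02 :: t0) :: (a10 :: a11 :: a12 :: t1) :: (a20 :: a21 :: a22 :: t2) :: rest) 1 2 = a12 from rfl, show pvCell ((a00 :: a01 :: a02 :: t0) :: (a10 :: a11 :: a12 :: t1) :: (a20 :: a21 :: a22 :: t2) :: rest) 2 0 = a20 from rfl, show pvCell ((a00 :: a01 :: a02 :: t0) :: (a10 :: a11 :: a12 :: t1) :: (a20 :: a21 :: a22 :: t2) :: rest) 2 1 = a21 from rfl, show pvCell ((a00 :: a01 :: a02 :: t0) :: (a10 :: a11 :: a12 :: t1) :: (a20 :: a21 :: a22 :: t2) :: rest) 2 2 = a22 from rfl]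
      generalize (a00 == val) = b00
      generalize (a01 == val) = b01
      generalize (a02 == val) = b02
      generalize (a10 == val) = b10
      generalize (a11 == val) = b11
      generalize (a12 == val) = b12
      generalize (a20 == val) = b20
      generalize (a21 == val) = b21
      generalize (a22 == val) = b22
      revert b00 b01 b02 b10 b11 b12 b20 b21 b22
      decide
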